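-- pv_equiv track=rewrite | github.com/MoonJH-2/Algorithm-Practice | day-by-day/deep1/1316.py | is_group_char
-- ===== SOURCE A (Python) =====
-- def is_group_char(word):
--     seen = set()
--     prev_char = ''
--
--     for char in word:
--         if char != prev_char:
--             if char in seen:
--                 return False
--             seen.add(char)
--         prev_char = char
--     return True
-- ===== SOURCE B (Python) =====
-- def is_group_char(word):
--     if not word:
--         return True
--     rest = word.lstrip(word[0])
--     return word[0] not in rest and is_group_char(rest)
-- ===== Notes on version B (the rewrite author's own statement) =====
-- stated objective: alternative
-- what changed: Replaces the single left-to-right scan that remembers past characters in a seen-set by a recursive run-peeling: strip the leading run of the first character, check that character never reappears in the remainder (forward lookahead instead of backward memory), and recurse on the remainder with no auxiliary set.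
import Mathlib
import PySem

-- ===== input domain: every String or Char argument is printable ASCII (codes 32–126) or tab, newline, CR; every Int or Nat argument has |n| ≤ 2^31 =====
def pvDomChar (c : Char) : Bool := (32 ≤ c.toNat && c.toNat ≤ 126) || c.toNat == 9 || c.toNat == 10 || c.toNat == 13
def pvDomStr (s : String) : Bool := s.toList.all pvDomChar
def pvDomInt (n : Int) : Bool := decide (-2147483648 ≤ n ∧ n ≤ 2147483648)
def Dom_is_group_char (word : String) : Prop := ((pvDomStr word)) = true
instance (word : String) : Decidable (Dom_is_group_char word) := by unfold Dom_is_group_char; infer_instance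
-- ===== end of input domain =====

-- B replaces A's single scan with a seen-set by recursive run-peeling: strip the leading run,
-- check its character never reappears in the remainder, recurse (alternative decomposition, no set).

-- ===== PORT A =====
-- the for-loop with early return: state = (seen, prev_char); prev_char is a Python string ('' initially)
def pvGoA : List Char → PySem.Set Char → String → Bool
  | [], _, _ => true
  | c :: cs, seen, prev =>
    if String.ofList [c] ≠ prev then
      if PySem.Set.contains seen c then false
      else pvGoA cs (PySem.Set.add seen c) (String.ofList [c])
    else pvGoA cs seen (String.ofList [c])

def is_group_char (word : String) : Bool := pvGoA word.toList PySem.Set.empty ""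

-- ===== PORT B =====
-- Source B's recursion: empty → True; else rest = word.lstrip(word[0]) (drop the leading run of the
-- first character — exact, since the strip set is that single char), then
-- word[0] not in rest and is_group_char(rest).
def pvGoB : List Char → Bool
  | [] => true
  | c :: cs =>
    let rest := cs.dropWhile (· == c)
    !rest.contains c && pvGoB rest
termination_by l => l.length
decreasing_by
  simp only [List.length_cons]
  exact Nat.lt_succ_of_le (List.length_dropWhile_le _ _)

def is_group_char_alt (word : String) : Bool := pvGoB word.toList

-- ===== PRECONDITION & SPEC =====
def Spec_is_group_char (word : String) (out : Bool) : Prop := out = is_group_char_alt word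
instance (word : String) (out : Bool) : Decidable (Spec_is_group_char word out) := by unfold Spec_is_group_char; infer_instance

-- ===== CLAIM (what is proved, stated in full; the proofs are below) =====
def Claim_equal_is_group_char : Prop := ∀ (word : String), Dom_is_group_char word → Spec_is_group_char word (is_group_char word)

-- ===== LEMMAS AND PROOFS =====

-- proof-only helpers: the run-key list of a word, and A's scan rephrased on it
def pvKeys : Option Char → List Char → List Char
  | _, [] => []
  | p, c :: cs => if p = some c then pvKeys p cs else c :: pvKeys (some c) cs

def pvChk : List Char → PySem.Set Char → Bool
  | [], _ => true
  | c :: cs, seen => if PySem.Set.contains seen c then false else pvChk cs (PySem.Set.add seen c)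

def pvStrOf : Option Char → String
  | none => ""
  | some c => String.ofList [c]

theorem pv_mk_eq_strOf (c : Char) (p : Option Char) : (String.ofList [c] = pvStrOf p) ↔ p = some c := by
  cases p with
  | none =>
    simp only [pvStrOf]
    constructor
    · intro h; have := congrArg String.toList h; simp only [String.toList_ofList] at this; simp at this
    · intro h; cases h
  | some c' =>
    simp only [pvStrOf]
    constructor
    · intro h
      have := congrArg String.toList h
      simp only [String.toList_ofList] at this
      simp at this
      simp [this]
    · intro h; cases h; rfl

theorem pvGoA_eq_chk (l : List Char) (p : Option Char) (seen : PySem.Set Char) :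
    pvGoA l seen (pvStrOf p) = pvChk (pvKeys p l) seen := by
  induction l generalizing p seen with
  | nil => rfl
  | cons c cs ih =>
    simp only [pvGoA, pvKeys]
    by_cases h : p = some c
    · subst h
      have : ¬ String.ofList [c] ≠ pvStrOf (some c) := by simp [pvStrOf]
      rw [if_neg this, if_pos rfl]
      exact ih (some c) seen
    · have hne : String.ofList [c] ≠ pvStrOf p := by
        intro hc; exact h ((pv_mk_eq_strOf c p).mp hc)
      rw [if_pos hne, if_neg h]
      simp only [pvChk]
      by_cases hs : c ∈ seen
      · simp [PySem.Set.contains, hs]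
      · rw [if_neg (by simp [PySem.Set.contains, hs]), if_neg (by simp [PySem.Set.contains, hs])]
        exact ih (some c) (PySem.Set.add seen c)

-- A's scan succeeds iff the run-key list has no duplicates and avoids `seen`
theorem pvChk_iff (l : List Char) (s : PySem.Set Char) :
    pvChk l s = true ↔ l.Nodup ∧ ∀ x ∈ l, x ∉ s := by
  induction l generalizing s with
  | nil => simp [pvChk]
  | cons c cs ih =>
    simp only [pvChk]
    by_cases hs : c ∈ s
    · rw [if_pos (by simp [PySem.Set.contains, hs])]
      simp only [Bool.false_eq_true, false_iff, not_and]
      intro _ h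
      exact (h c (by simp)) hs
    · rw [if_neg (by simp [PySem.Set.contains, hs]), ih]
      constructor
      · rintro ⟨hn, hmem⟩
        refine ⟨List.nodup_cons.mpr ⟨fun hc => ?_, hn⟩, ?_⟩
        · exact (hmem c hc) (by simp [PySem.Set.mem_add])
        · intro x hx
          rcases List.mem_cons.mp hx with rfl | hx
          · exact hs
          · intro hxs; exact (hmem x hx) (by simp [PySem.Set.mem_add, hxs])
      · rintro ⟨hn, hmem⟩
        rcases List.nodup_cons.mp hn with ⟨hc, hn'⟩
        refine ⟨hn', fun x hx hxa => ?_⟩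
        rcases (by simpa [PySem.Set.mem_add] using hxa : x ∈ s ∨ x = c) with hxs | rfl
        · exact (hmem x (by simp [hx])) hxs
        · exact hc hx

theorem pvKeys_some_eq_dropWhile (c : Char) (l : List Char) :
    pvKeys (some c) l = pvKeys none (l.dropWhile (· == c)) := by
  induction l with
  | nil => rfl
  | cons x xs ih =>
    by_cases h : x = c
    · subst h
      have h1 : pvKeys (some x) (x :: xs) = pvKeys (some x) xs := by
        simp [pvKeys]
      have h2 : (x :: xs).dropWhile (· == x) = xs.dropWhile (· == x) := by
        simp
      rw [h1, h2, ih]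
    · have hb : (x == c) = false := by simp [h]
      have h1 : pvKeys (some c) (x :: xs) = x :: pvKeys (some x) xs := by
        rw [pvKeys, if_neg (by intro hc; exact h (Option.some_inj.mp hc).symm)]
      have h2 : (x :: xs).dropWhile (· == c) = x :: xs := by
        simp [hb]
      have h3 : pvKeys none (x :: xs) = x :: pvKeys (some x) xs := by
        simp [pvKeys]
      rw [h1, h2, h3]

theorem pv_mem_keys_none_fuel (x : Char) : ∀ (n : Nat) (l : List Char), l.length ≤ n →
    (x ∈ pvKeys none l ↔ x ∈ l) := by
  intro n
  induction n with
  | zero =>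
    intro l hl
    have : l = [] := List.eq_nil_of_length_eq_zero (Nat.le_zero.mp hl)
    subst this; simp [pvKeys]
  | succ n ih =>
    intro l hl
    cases l with
    | nil => simp [pvKeys]
    | cons c cs =>
      have hrest : (cs.dropWhile (· == c)).length ≤ n := by
        have := List.length_dropWhile_le (· == c) cs
        simp only [List.length_cons] at hl
        omega
      have hk : pvKeys none (c :: cs) = c :: pvKeys none (cs.dropWhile (· == c)) := by
        simp [pvKeys, pvKeys_some_eq_dropWhile]
      rw [hk]
      simp only [List.mem_cons, ih _ hrest]
      constructor
      · rintro (rfl | hx)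
        · exact Or.inl rfl
        · exact Or.inr ((List.dropWhile_sublist _).subset hx)
      · rintro (rfl | hx)
        · exact Or.inl rfl
        · rcases List.mem_append.mp (by rw [List.takeWhile_append_dropWhile]; exact hx :
            x ∈ cs.takeWhile (· == c) ++ cs.dropWhile (· == c)) with ht | hd
          · exact Or.inl (by simpa using List.mem_takeWhile_imp ht)
          · exact Or.inr hd

theorem pv_mem_keys_none (x : Char) (l : List Char) : x ∈ pvKeys none l ↔ x ∈ l :=
  pv_mem_keys_none_fuel x l.length l (Nat.le_refl _)

-- B succeeds iff the run-key list has no duplicates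
theorem pvGoB_iff_fuel : ∀ (n : Nat) (l : List Char), l.length ≤ n →
    (pvGoB l = true ↔ (pvKeys none l).Nodup) := by
  intro n
  induction n with
  | zero =>
    intro l hl
    have : l = [] := List.eq_nil_of_length_eq_zero (Nat.le_zero.mp hl)
    subst this; simp [pvGoB, pvKeys]
  | succ n ih =>
    intro l hl
    cases l with
    | nil => simp [pvGoB, pvKeys]
    | cons c cs =>
      have hrest : (cs.dropWhile (· == c)).length ≤ n := by
        have := List.length_dropWhile_le (· == c) cs
        simp only [List.length_cons] at hl
        omega
      have hk : pvKeys none (c :: cs) = c :: pvKeys none (cs.dropWhile (· == c)) := by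
        simp [pvKeys, pvKeys_some_eq_dropWhile]
      rw [hk]
      simp only [pvGoB, Bool.and_eq_true, Bool.not_eq_true', ih _ hrest, List.nodup_cons,
        List.contains_eq_mem, decide_eq_false_iff_not, pv_mem_keys_none]

theorem pvGoB_iff (l : List Char) : pvGoB l = true ↔ (pvKeys none l).Nodup :=
  pvGoB_iff_fuel l.length l (Nat.le_refl _)

theorem is_group_char_spec : Claim_equal_is_group_char := by
  intro word _
  unfold Spec_is_group_char is_group_char is_group_char_alt
  have h1 : ("" : String) = pvStrOf none := rfl
  rw [h1, pvGoA_eq_chk]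
  rw [Bool.eq_iff_iff, pvChk_iff, pvGoB_iff]
  constructor
  · rintro ⟨hn, _⟩; exact hn
  · intro hn
    refine ⟨hn, fun x _ hx => ?_⟩
    simp [PySem.Set.empty] at hx
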